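-- pv_equiv track=rewrite | github.com/Luca683/my-personal-assistant | src/modules/mod_volume.py | retrieve_number_in_string
-- ===== SOURCE A (Python) =====
-- def clamp_val(number: int) -> int:
--     if number < 0:
--         return 0
--     elif number > 100:
--         return 100
--
--     return number
--
-- def retrieve_number_in_string(string: str) -> int:
--     number = ""
--     flag = 0
--     for w in string:
--         if w.isdigit():
--             number += w
--             flag = 1
--         elif flag == 1:
--             break
--
--     if number == "":
--         return -1
--
--     return clamp_val(int(number))
-- ===== SOURCE B (Python) =====
-- def retrieve_number_in_string(string: str) -> int:
--     # skip to the first digit, then consume the digit run: two index scans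
--     n = len(string)
--     i = 0
--     while i < n and not string[i].isdigit():
--         i += 1
--     j = i
--     while j < n and string[j].isdigit():
--         j += 1
--     if i == j:
--         return -1
--     return max(0, min(100, int(string[i:j])))
-- ===== Notes on version B (the rewrite author's own statement) =====
-- stated objective: simpler
-- what changed: Replaces A's single flag-driven loop with break and the clamp_val helper by a skip-then-take two-phase scan (drop to the first digit, consume the digit run) with the clamp inlined as max(0, min(100, .)).
import Mathlib
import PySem

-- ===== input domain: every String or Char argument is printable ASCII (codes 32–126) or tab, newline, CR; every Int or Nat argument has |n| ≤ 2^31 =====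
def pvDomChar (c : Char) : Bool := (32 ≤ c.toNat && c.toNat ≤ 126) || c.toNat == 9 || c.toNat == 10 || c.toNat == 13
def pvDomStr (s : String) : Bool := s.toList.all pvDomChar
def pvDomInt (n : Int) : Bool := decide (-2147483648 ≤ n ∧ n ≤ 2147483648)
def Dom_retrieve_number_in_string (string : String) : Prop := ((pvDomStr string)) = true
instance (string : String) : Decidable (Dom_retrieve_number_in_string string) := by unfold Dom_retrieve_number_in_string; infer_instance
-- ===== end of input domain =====

-- B replaces A's flag-driven accumulation loop by a skip-then-take two-phase scan with an inlined
-- max/min clamp (objective: simpler decomposition; same cost).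

-- ===== PORT A =====
def clamp_val (number : Int) : Int :=
  if number < 0 then 0
  else if number > 100 then 100
  else number

-- the for-loop with `break`: state = (number, flag)
def pvALoop : List Char → List Char → Int → List Char
  | [], number, _ => number
  | w :: rest, number, flag =>
    if PySem.Chars.isdigit w then pvALoop rest (number ++ [w]) 1
    else if flag = 1 then number
    else pvALoop rest number flag

def retrieve_number_in_string (string : String) : Int :=
  let number := pvALoop string.toList [] 0
  if number = [] then -1
  -- int(number): number is a nonempty run of ASCII digits, so int() always succeeds; getD 0 is unreachable
  else clamp_val ((PySem.Int.ofChars? number).getD 0)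

-- ===== PORT B =====
-- first while loop of Source B: advance i past non-digit characters
def pvBSkipIdx (s : List Char) (i : Nat) : Nat :=
  if h : i < s.length then
    if PySem.Chars.isdigit s[i] then i else pvBSkipIdx s (i + 1)
  else i
termination_by s.length - i

-- second while loop of Source B: advance j past the digit run
def pvBTakeIdx (s : List Char) (j : Nat) : Nat :=
  if h : j < s.length then
    if PySem.Chars.isdigit s[j] then pvBTakeIdx s (j + 1) else j
  else j
termination_by s.length - j

def retrieve_number_in_string_alt (string : String) : Int :=
  let s := string.toList
  let i := pvBSkipIdx s 0
  let j := pvBTakeIdx s i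
  if i = j then -1
  -- int(string[i:j]): a nonempty run of ASCII digits, so int() always succeeds; getD 0 is unreachable
  else max 0 (min 100 ((PySem.Int.ofChars? (PySem.List.slice s (some (i : Int)) (some (j : Int)))).getD 0))

-- ===== PRECONDITION & SPEC =====
def Spec_retrieve_number_in_string (string : String) (out : Int) : Prop := out = retrieve_number_in_string_alt string
instance (string : String) (out : Int) : Decidable (Spec_retrieve_number_in_string string out) := by unfold Spec_retrieve_number_in_string; infer_instance

-- ===== CLAIM (what is proved, stated in full; the proofs are below) =====
def Claim_equal_retrieve_number_in_string : Prop := ∀ (string : String), Dom_retrieve_number_in_string string → Spec_retrieve_number_in_string string (retrieve_number_in_string string)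

-- ===== LEMMAS AND PROOFS =====

-- proof-side list versions of the two scans (what the index loops leave of the list)
def pvBSkip : List Char → List Char
  | [] => []
  | c :: r => if PySem.Chars.isdigit c then c :: r else pvBSkip r

def pvBTake : List Char → List Char
  | [] => []
  | c :: r => if PySem.Chars.isdigit c then c :: pvBTake r else []

-- once the flag is set, A's loop appends exactly the leading digit run
theorem pvALoop_flag_one (cs : List Char) : ∀ acc, pvALoop cs acc 1 = acc ++ pvBTake cs := by
  induction cs with
  | nil => intro acc; simp [pvALoop, pvBTake]
  | cons c r ih =>
    intro acc
    by_cases h : PySem.Chars.isdigit c = true <;> simp [pvALoop, pvBTake, h, ih]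

-- A's whole loop computes the leading digit run after the non-digit prefix
theorem pvALoop_eq (cs : List Char) : pvALoop cs [] 0 = pvBTake (pvBSkip cs) := by
  induction cs with
  | nil => simp [pvALoop, pvBSkip, pvBTake]
  | cons c r ih =>
    by_cases h : PySem.Chars.isdigit c = true
    · simp [pvALoop, pvBSkip, pvBTake, h, pvALoop_flag_one]
    · simpa [pvALoop, pvBSkip, h] using ih

theorem pvBSkipIdx_drop (s : List Char) (i : Nat) : s.drop (pvBSkipIdx s i) = pvBSkip (s.drop i) := by
  rw [pvBSkipIdx]
  by_cases h : i < s.length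
  · rw [dif_pos h]
    by_cases hd : PySem.Chars.isdigit s[i] = true
    · rw [if_pos hd, List.drop_eq_getElem_cons h, pvBSkip, if_pos hd]
    · rw [if_neg hd, pvBSkipIdx_drop s (i + 1), List.drop_eq_getElem_cons h, pvBSkip, if_neg hd]
  · rw [dif_neg h, List.drop_eq_nil_of_le (by omega), pvBSkip]
termination_by s.length - i

theorem pvBTakeIdx_le (s : List Char) (j : Nat) : j ≤ pvBTakeIdx s j := by
  rw [pvBTakeIdx]
  by_cases h : j < s.length
  · rw [dif_pos h]
    by_cases hd : PySem.Chars.isdigit s[j] = true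
    · rw [if_pos hd]
      have := pvBTakeIdx_le s (j + 1)
      omega
    · rw [if_neg hd]
  · rw [dif_neg h]
termination_by s.length - j

theorem pvBTakeIdx_take (s : List Char) (j : Nat) :
    (s.drop j).take (pvBTakeIdx s j - j) = pvBTake (s.drop j) := by
  rw [pvBTakeIdx]
  by_cases h : j < s.length
  · rw [dif_pos h]
    by_cases hd : PySem.Chars.isdigit s[j] = true
    · have hle := pvBTakeIdx_le s (j + 1)
      rw [if_pos hd, List.drop_eq_getElem_cons h, pvBTake, if_pos hd,
        show pvBTakeIdx s (j + 1) - j = (pvBTakeIdx s (j + 1) - (j + 1)) + 1 by omega,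
        List.take_succ_cons, pvBTakeIdx_take s (j + 1)]
    · rw [if_neg hd, List.drop_eq_getElem_cons h, pvBTake, if_neg hd]
      simp
  · rw [dif_neg h, List.drop_eq_nil_of_le (by omega), pvBTake]
    simp
termination_by s.length - j

theorem pvBTakeIdx_eq_iff (s : List Char) (j : Nat) :
    pvBTakeIdx s j = j ↔ pvBTake (s.drop j) = [] := by
  by_cases h : j < s.length
  · rw [List.drop_eq_getElem_cons h, pvBTake]
    by_cases hd : PySem.Chars.isdigit s[j] = true
    · rw [pvBTakeIdx, dif_pos h, if_pos hd]
      have := pvBTakeIdx_le s (j + 1)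
      constructor <;> intro hc <;> [omega; simp [hd] at hc]
    · rw [pvBTakeIdx, dif_pos h, if_neg hd]
      simp [hd]
  · rw [pvBTakeIdx, dif_neg h, List.drop_eq_nil_of_le (by omega), pvBTake]
    simp

theorem clamp_val_eq (v : Int) : clamp_val v = max 0 (min 100 v) := by
  unfold clamp_val; split_ifs <;> omega

-- ===== VERDICT (by name: the statement is the Claim_ definition above) =====
theorem retrieve_number_in_string_spec : Claim_equal_retrieve_number_in_string := by
  intro string _
  unfold Spec_retrieve_number_in_string retrieve_number_in_string retrieve_number_in_string_alt
  simp only [pvALoop_eq, clamp_val_eq, PySem.List.slice_natCast]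
  set s := string.toList
  have hskip : s.drop (pvBSkipIdx s 0) = pvBSkip s := by
    simpa using pvBSkipIdx_drop s 0
  have htake := pvBTakeIdx_take s (pvBSkipIdx s 0)
  rw [hskip] at htake
  have hiff := pvBTakeIdx_eq_iff s (pvBSkipIdx s 0)
  rw [hskip] at hiff
  rw [hskip]
  by_cases hnil : pvBTake (pvBSkip s) = []
  · rw [if_pos hnil, if_pos (hiff.mpr hnil).symm]
  · rw [if_neg hnil, if_neg (fun hc => hnil (hiff.mp hc.symm)), htake]
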